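-- pv_equiv track=rewrite | github.com/migdyawan/Lapbot | Bot.py | buat_laporan
-- ===== SOURCE A (Python) =====
-- def buat_laporan(input_text):
--     lines = input_text.strip().split("\n")
--
--     # Baris pertama = hari + tanggal
--     header = lines[0].strip()
--     laporan = f"Selamat malam Gubernur\n"
--     laporan += f"mohon ijin melaporkan rengiat hari {header.replace('  ', ' ')} sbb:\n\n"
--
--     nomor = 1
--     kegiatan = []
--     current = {}
--
--     for line in lines[1:]:
--         line = line.strip()
--         if not line:
--             if current:
--                 kegiatan.append(current)
--                 current = {}
--             continue
--
--         # Deteksi waktu (format 07.00, 15.30, dll)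
--         if line[:5].replace('.', '').isdigit():
--             waktu, *judul = line.split(" ")
--             current = {
--                 "waktu": waktu,
--                 "judul": " ".join(judul).strip() + ".",
--                 "detail": []
--             }
--         else:
--             parts = line.split(" ")
--             kata = parts[0].lower()
--             isi_text = " ".join(parts[1:])
--
--             mapping = {
--                 "irup": "Irup",
--                 "pimpinan": "Pimpinan",
--                 "tempat": "Tempat",
--                 "pakaian": "Pakaian"
--             }
--
--             if kata in mapping:
--                 if kata == "pakaian":
--                     current["detail"].append(f"- {mapping[kata]} : {isi_text}")
--                 else:
--                     current["detail"].append(f"- {mapping[kata]}: {isi_text}")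
--
--     if current:
--         kegiatan.append(current)
--
--     # Susun output laporan
--     for item in kegiatan:
--         laporan += f"{nomor}.  Pukul {item['waktu']} WIB\n"
--         laporan += f"{item['judul']}\n"
--         for d in item["detail"]:
--             laporan += f"{d}\n"
--         laporan += "\n"
--         nomor += 1
--
--     laporan += "Demikian kami laporkan   terimakasih selamat malam."
--     return laporan
-- ===== SOURCE B (Python) =====
-- def buat_laporan(input_text):
--     lines = input_text.strip().split("\n")
--     header = lines[0].strip().replace('  ', ' ')
--     mapping = {"irup": "Irup", "pimpinan": "Pimpinan",
--                "tempat": "Tempat", "pakaian": "Pakaian"}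
--     parts = ["Selamat malam Gubernur\n",
--              "mohon ijin melaporkan rengiat hari " + header + " sbb:\n\n"]
--     nomor = 0
--     block = None  # fragments of the open activity block, or None
--
--     def flush():
--         nonlocal nomor, block
--         if block is not None:
--             nomor += 1
--             parts.append(str(nomor))
--             parts.extend(block)
--             parts.append("\n")
--             block = None
--
--     for raw in lines[1:]:
--         line = raw.strip()
--         if not line:
--             flush()
--             continue
--         words = line.split(" ")
--         if line[:5].replace('.', '').isdigit():
--             judul = " ".join(words[1:]).strip() + "."
--             block = [f".  Pukul {words[0]} WIB\n{judul}\n"]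
--         else:
--             kata = words[0].lower()
--             if kata in mapping and block is not None:
--                 sep = " : " if kata == "pakaian" else ": "
--                 block.append(f"- {mapping[kata]}{sep}{' '.join(words[1:])}\n")
--     flush()
--     parts.append("Demikian kami laporkan   terimakasih selamat malam.")
--     return "".join(parts)
-- ===== Notes on version B (the rewrite author's own statement) =====
-- stated objective: alternative
-- what changed: B fuses A's two passes (build a list of activity record dicts, then a second formatting loop over them) into a single pass over the lines that emits each formatted block the moment it closes, keeping only the running number and the open block's fragments, and joins the fragments once at the end.
import Mathlib
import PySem

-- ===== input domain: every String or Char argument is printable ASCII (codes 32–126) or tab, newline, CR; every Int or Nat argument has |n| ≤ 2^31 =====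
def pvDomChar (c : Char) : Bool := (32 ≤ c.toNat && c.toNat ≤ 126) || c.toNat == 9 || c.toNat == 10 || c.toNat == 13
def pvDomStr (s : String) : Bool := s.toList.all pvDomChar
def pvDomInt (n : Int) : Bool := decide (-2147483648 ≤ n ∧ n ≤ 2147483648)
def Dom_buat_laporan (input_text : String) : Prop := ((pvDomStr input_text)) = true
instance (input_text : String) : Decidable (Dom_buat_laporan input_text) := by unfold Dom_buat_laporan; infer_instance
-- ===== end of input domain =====

-- B fuses A's two passes (build record dicts, then format) into one pass that emits each
-- formatted block as soon as it closes, and B returns the report (skipping the orphan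
-- attribute line) where A raises KeyError; objective: alternative decomposition.

-- shared primitive helpers (used by both ports and by Pre_)
-- s.split(sep) with a nonempty literal sep, so split? is always `some` (exact)
def pvSplit (s sep : String) : List String := (PySem.Str.split? s sep).getD []

-- line[:5].replace('.', '').isdigit()
def pvTimeLike (line : String) : Bool :=
  PySem.Str.strIsdigit (PySem.Str.replace (PySem.Str.slice line none (some 5)) "." "")

def pvMapping : PySem.Dict String String :=
  PySem.Dict.ofList [("irup", "Irup"), ("pimpinan", "Pimpinan"), ("tempat", "Tempat"), ("pakaian", "Pakaian")]

-- ===== PORT A =====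
-- the record dict {"waktu": …, "judul": …, "detail": […]} (always carries these three keys)
structure PvRec where
  waktu : String
  judul : String
  detail : List String

-- body of A's first loop; state = (kegiatan, current), `none` current = the empty dict {};
-- the whole state is `Option` because Python raises KeyError on current["detail"] when
-- current is {} (outside Pre_); `none` state = "has raised"
def pvStepACore (keg : List PvRec) (cur : Option PvRec) (raw : String) :
    Option (List PvRec × Option PvRec) :=
    -- line = line.strip(); parts = line.split(" "); kata = parts[0].lower();
    -- isi_text = " ".join(parts[1:])  (locals inlined)
    if PySem.Str.strip raw = "" then
      match cur with
      | some c => some (keg ++ [c], none)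
      | none => some (keg, cur)
    else if pvTimeLike (PySem.Str.strip raw) then
      some (keg, some ⟨(pvSplit (PySem.Str.strip raw) " ").headD "",
        PySem.Str.strip (PySem.Str.join " " ((pvSplit (PySem.Str.strip raw) " ").drop 1)) ++ ".", []⟩)
    else
      match pvMapping.get? (PySem.Str.lower ((pvSplit (PySem.Str.strip raw) " ").headD "")) with
      | some label =>
        match cur with
        | some c =>
          some (keg, some ⟨c.waktu, c.judul,
            c.detail ++ [if PySem.Str.lower ((pvSplit (PySem.Str.strip raw) " ").headD "") = "pakaian"
                         then "- " ++ label ++ " : " ++ PySem.Str.join " " ((pvSplit (PySem.Str.strip raw) " ").drop 1)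
                         else "- " ++ label ++ ": " ++ PySem.Str.join " " ((pvSplit (PySem.Str.strip raw) " ").drop 1)]⟩)
        | none => none  -- Python: KeyError on current["detail"] with current == {}
      | none => some (keg, cur)

def pvStepA (st : Option (List PvRec × Option PvRec)) (raw : String) :
    Option (List PvRec × Option PvRec) :=
  match st with
  | none => none
  | some (keg, cur) => pvStepACore keg cur raw

-- body of A's output loop; state = (laporan, nomor)
def pvFmtStep (st : String × Int) (item : PvRec) : String × Int :=
  let l := st.1 ++ (PySem.Int.toStr st.2 ++ ".  Pukul " ++ item.waktu ++ " WIB\n")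
  let l := l ++ (item.judul ++ "\n")
  let l := item.detail.foldl (fun acc d => acc ++ (d ++ "\n")) l
  (l ++ "\n", st.2 + 1)

def buat_laporan (input_text : String) : String :=
  -- lines = input_text.strip().split("\n"); header = lines[0].strip() (locals inlined;
  -- lines[0] as headD: split(sep) is never empty); the loop state is Option (crash tracking)
  match ((pvSplit (PySem.Str.strip input_text) "\n").drop 1).foldl pvStepA (some ([], none)) with
  | none => ""  -- Python raised KeyError; excluded by Pre_
  | some (keg, cur) =>
    ((match cur with | some c => keg ++ [c] | none => keg).foldl pvFmtStep
      ("Selamat malam Gubernur\n" ++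
        ("mohon ijin melaporkan rengiat hari " ++
          PySem.Str.replace (PySem.Str.strip ((pvSplit (PySem.Str.strip input_text) "\n").headD "")) "  " " " ++
          " sbb:\n\n"), 1)).1 ++
      "Demikian kami laporkan   terimakasih selamat malam."

-- ===== PORT B =====
-- B's state: (emitted fragments, nomor, open block fragments or None)
def pvFlushB (st : List String × Int × Option (List String)) :
    List String × Int × Option (List String) :=
  match st with
  | (parts, nomor, some b) => (parts ++ [PySem.Int.toStr (nomor + 1)] ++ b ++ ["\n"], nomor + 1, none)
  | (parts, nomor, none) => (parts, nomor, none)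

def pvStepB (st : List String × Int × Option (List String)) (raw : String) :
    List String × Int × Option (List String) :=
  -- line = raw.strip(); words = line.split(" "); kata = words[0].lower();
  -- judul = " ".join(words[1:]).strip() + "."; sep = " : " / ": "  (locals inlined)
  if PySem.Str.strip raw = "" then pvFlushB st
  else if pvTimeLike (PySem.Str.strip raw) then
    (st.1, st.2.1, some [".  Pukul " ++ ((pvSplit (PySem.Str.strip raw) " ").headD "") ++ " WIB\n" ++
      (PySem.Str.strip (PySem.Str.join " " ((pvSplit (PySem.Str.strip raw) " ").drop 1)) ++ ".") ++ "\n"])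
  else
    match pvMapping.get? (PySem.Str.lower ((pvSplit (PySem.Str.strip raw) " ").headD "")), st.2.2 with
    | some label, some b =>
      (st.1, st.2.1, some (b ++ ["- " ++ label ++
        (if PySem.Str.lower ((pvSplit (PySem.Str.strip raw) " ").headD "") = "pakaian" then " : " else ": ") ++
        PySem.Str.join " " ((pvSplit (PySem.Str.strip raw) " ").drop 1) ++ "\n"]))
    | _, _ => st

def buat_laporan_alt (input_text : String) : String :=
  -- lines / header inlined as in A's port; state = (parts, nomor, block)
  PySem.Str.join ""
    ((pvFlushB (((pvSplit (PySem.Str.strip input_text) "\n").drop 1).foldl pvStepB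
        (["Selamat malam Gubernur\n",
          "mohon ijin melaporkan rengiat hari " ++
            PySem.Str.replace (PySem.Str.strip ((pvSplit (PySem.Str.strip input_text) "\n").headD "")) "  " " " ++
            " sbb:\n\n"], 0, none))).1 ++
      ["Demikian kami laporkan   terimakasih selamat malam."])

-- ===== PRECONDITION & SPEC =====
-- a stripped line that takes A's detail-appending branch
def pvIsMappingLine (l : String) : Bool :=
  !(l == "") && !pvTimeLike l &&
    (pvMapping.get? (PySem.Str.lower ((pvSplit l " ").headD ""))).isSome

-- the stripped lines after the header line
def pvStrippedTail (input_text : String) : List String :=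
  ((pvSplit (PySem.Str.strip input_text) "\n").drop 1).map PySem.Str.strip

-- Pre_ excludes exactly the inputs on which A raises KeyError: those with an
-- irup/pimpinan/tempat/pakaian attribute line not preceded, within its blank-line-delimited
-- paragraph, by a time line; A returns on every input satisfying Pre_.
def Pre_buat_laporan (input_text : String) : Prop :=
  ∀ j, j < (pvStrippedTail input_text).length →
    pvIsMappingLine ((pvStrippedTail input_text).getD j "") = true →
    ∃ k, k < j ∧ pvTimeLike ((pvStrippedTail input_text).getD k "") = true ∧
      ∀ m, m < j → k < m → (pvStrippedTail input_text).getD m "" ≠ ""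

instance (input_text : String) : Decidable (Pre_buat_laporan input_text) := by
  unfold Pre_buat_laporan; infer_instance

def pvWitness_buat_laporan : String := "senin 1-1\n\n07.00 apel pagi\nirup kapolres"

def Spec_buat_laporan (input_text : String) (out : String) : Prop := out = buat_laporan_alt input_text
instance (input_text : String) (out : String) : Decidable (Spec_buat_laporan input_text out) := by unfold Spec_buat_laporan; infer_instance

-- ===== CLAIM (what is proved, stated in full; the proofs are below) =====
def Claim_equal_buat_laporan : Prop := ∀ (input_text : String), Dom_buat_laporan input_text → Pre_buat_laporan input_text → Spec_buat_laporan input_text (buat_laporan input_text)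

-- ===== LEMMAS AND PROOFS =====

-- B's fragment list for an open record
def pvBlockOf (c : PvRec) : List String :=
  [".  Pukul " ++ c.waktu ++ " WIB\n" ++ c.judul ++ "\n"] ++ c.detail.map (· ++ "\n")

-- the fragments B has emitted for a finished record list, numbered from i
def pvEmit : Int → List PvRec → List String
  | _, [] => []
  | i, r :: rs => ([PySem.Int.toStr i] ++ pvBlockOf r ++ ["\n"]) ++ pvEmit (i + 1) rs

-- B's state corresponding to A's loop state, over a fixed emitted prefix
def pvBOf (pre : List String) (st : List PvRec × Option PvRec) :
    List String × Int × Option (List String) :=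
  (pre ++ pvEmit 1 st.1, (st.1.length : Int), st.2.map pvBlockOf)

-- "current is truthy" flag after processing a stripped line
def pvFlag (b : Bool) (line : String) : Bool :=
  if line = "" then false else if pvTimeLike line then true else b

-- safety of a stripped tail given the flag: no mapping line while current is empty
def pvSafeS : Bool → List String → Prop
  | _, [] => True
  | b, l :: rest => (b = false → pvIsMappingLine l = false) ∧ pvSafeS (pvFlag b l) rest

lemma pvTimeLike_empty_false : pvTimeLike "" = false := by decide

lemma pvEmit_append (ks : List PvRec) (c : PvRec) : ∀ i,
    pvEmit i (ks ++ [c]) = pvEmit i ks ++ ([PySem.Int.toStr (i + ks.length)] ++ pvBlockOf c ++ ["\n"]) := by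
  induction ks with
  | nil => intro i; simp [pvEmit]
  | cons r rs ih =>
    intro i
    have h : i + ((rs.length + 1 : Nat) : Int) = i + 1 + (rs.length : Int) := by push_cast; ring
    simp only [List.cons_append, pvEmit, ih (i + 1), List.length_cons, List.append_assoc, h]

lemma pvStep_sim (pre : List String) (keg : List PvRec) (cur : Option PvRec) (raw : String)
    (h : cur = none → pvIsMappingLine (PySem.Str.strip raw) = false) :
    ∃ st', pvStepA (some (keg, cur)) raw = some st' ∧
      pvStepB (pvBOf pre (keg, cur)) raw = pvBOf pre st' ∧
      st'.2.isSome = pvFlag cur.isSome (PySem.Str.strip raw) := by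
  by_cases hline : PySem.Str.strip raw = ""
  · cases cur with
    | none =>
      exact ⟨(keg, none), by show pvStepACore keg none raw = some (keg, none); unfold pvStepACore; rw [hline]; simp,
        by unfold pvStepB pvBOf pvFlushB; rw [hline]; simp, by simp [pvFlag, hline]⟩
    | some c =>
      refine ⟨(keg ++ [c], none), by show pvStepACore keg (some c) raw = some (keg ++ [c], none); unfold pvStepACore; rw [hline]; simp, ?_, by simp [pvFlag, hline]⟩
      have he := pvEmit_append keg c 1
      have h1 : (1 : Int) + keg.length = keg.length + 1 := by ring
      rw [h1] at he
      unfold pvStepB pvBOf pvFlushB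
      rw [hline]
      simp [he]
  · by_cases htime : pvTimeLike (PySem.Str.strip raw) = true
    · refine ⟨(keg, some ⟨(pvSplit (PySem.Str.strip raw) " ").headD "",
        PySem.Str.strip (PySem.Str.join " " ((pvSplit (PySem.Str.strip raw) " ").drop 1)) ++ ".", []⟩),
        ?_, ?_, by simp [pvFlag, hline, htime]⟩
      · show pvStepACore keg cur raw = _; unfold pvStepACore; rw [if_neg hline, htime]; simp
      · unfold pvStepB pvBOf; rw [if_neg hline, htime]; simp [pvBlockOf]
    · have htime' : pvTimeLike (PySem.Str.strip raw) = false := by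
        cases hh : pvTimeLike (PySem.Str.strip raw) <;> simp_all
      have hfalse : ¬ (false = true) := by simp
      cases hget : pvMapping.get? (PySem.Str.lower ((pvSplit (PySem.Str.strip raw) " ").headD "")) with
      | none =>
        refine ⟨(keg, cur), ?_, ?_, by cases cur <;> simp [pvFlag, hline, htime']⟩
        · show pvStepACore keg cur raw = _; unfold pvStepACore; rw [if_neg hline, htime', if_neg hfalse, hget]
        · unfold pvStepB pvBOf; rw [if_neg hline, htime', if_neg hfalse, hget]
      | some label =>
        cases cur with
        | none =>
          exfalso
          have hM := h rfl
          rw [pvIsMappingLine, htime', hget] at hM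
          simp [hline] at hM
        | some c =>
          refine ⟨(keg, some ⟨c.waktu, c.judul, c.detail ++
              [if (PySem.Str.lower ((pvSplit (PySem.Str.strip raw) " ").headD "")) = "pakaian"
               then "- " ++ label ++ " : " ++ PySem.Str.join " " ((pvSplit (PySem.Str.strip raw) " ").drop 1)
               else "- " ++ label ++ ": " ++ PySem.Str.join " " ((pvSplit (PySem.Str.strip raw) " ").drop 1)]⟩),
            ?_, ?_, by simp [pvFlag, hline, htime']⟩
          · show pvStepACore keg (some c) raw = _; unfold pvStepACore; rw [if_neg hline, htime', if_neg hfalse, hget]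
          · unfold pvStepB pvBOf; rw [if_neg hline, htime', if_neg hfalse, hget]
            simp [pvBlockOf]
            split_ifs <;> simp [String.append_assoc]

lemma pvFold_sim : ∀ (ls : List String) (keg : List PvRec) (cur : Option PvRec) (pre : List String),
    pvSafeS cur.isSome (ls.map PySem.Str.strip) →
    ∃ st', ls.foldl pvStepA (some (keg, cur)) = some st' ∧
      ls.foldl pvStepB (pvBOf pre (keg, cur)) = pvBOf pre st' := by
  intro ls
  induction ls with
  | nil => exact fun keg cur pre _ => ⟨(keg, cur), rfl, rfl⟩
  | cons raw rest ih =>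
    intro keg cur pre hsafe
    rw [List.map_cons] at hsafe
    obtain ⟨h1, h2⟩ := hsafe
    obtain ⟨⟨keg', cur'⟩, hA, hB, hflag⟩ :=
      pvStep_sim pre keg cur raw (fun hc => h1 (by rw [hc]; rfl))
    rw [← hflag] at h2
    obtain ⟨st'', hA2, hB2⟩ := ih keg' cur' pre h2
    refine ⟨st'', ?_, ?_⟩
    · rw [List.foldl_cons, hA]; exact hA2
    · rw [List.foldl_cons, hB]; exact hB2

lemma pvSafeS_of_index : ∀ (L : List String) (b : Bool),
    (∀ j, j < L.length → pvIsMappingLine (L.getD j "") = true →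
      (∃ k, k < j ∧ pvTimeLike (L.getD k "") = true ∧
        ∀ m, m < j → k < m → L.getD m "" ≠ "") ∨
      (b = true ∧ ∀ m, m < j → L.getD m "" ≠ "")) →
    pvSafeS b L := by
  intro L
  induction L with
  | nil => intro _ _; trivial
  | cons l t ih =>
    intro b H
    constructor
    · intro hb
      by_contra hM
      have hM' : pvIsMappingLine l = true := by cases hmm : pvIsMappingLine l <;> simp_all
      rcases H 0 (by simp) (by simpa using hM') with ⟨k, hk, _⟩ | ⟨hbt, _⟩
      · omega
      · rw [hb] at hbt; cases hbt
    · apply ih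
      intro j hj hMj
      have Hj := H (j + 1) (by simpa using Nat.succ_lt_succ hj) (by simpa using hMj)
      rcases Hj with ⟨k, hk, hT, hBl⟩ | ⟨hbt, hBl⟩
      · cases k with
        | zero =>
          right
          have hT' : pvTimeLike l = true := by simpa using hT
          have hlne : l ≠ "" := by
            intro he; rw [he, pvTimeLike_empty_false] at hT'; cases hT'
          refine ⟨by simp [pvFlag, hlne, hT'], ?_⟩
          intro m hm
          have := hBl (m + 1) (by omega) (by omega)
          simpa using this
        | succ k' =>
          left
          refine ⟨k', by omega, by simpa using hT, ?_⟩
          intro m hm hk'm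
          have := hBl (m + 1) (by omega) (by omega)
          simpa using this
      · right
        have hl0 : l ≠ "" := by
          have := hBl 0 (by omega); simpa using this
        refine ⟨by simp [pvFlag, hl0, hbt], ?_⟩
        intro m hm
        have := hBl (m + 1) (by omega)
        simpa using this

lemma pvFlush_bOf (pre : List String) (keg : List PvRec) (cur : Option PvRec) :
    pvFlushB (pvBOf pre (keg, cur)) =
      pvBOf pre (match cur with | some c => keg ++ [c] | none => keg, none) := by
  cases cur with
  | none => rfl
  | some c =>
    have he := pvEmit_append keg c 1
    have h1 : (1 : Int) + keg.length = keg.length + 1 := by ring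
    rw [h1] at he
    unfold pvFlushB pvBOf
    simp [he]

lemma pvDetailFold_toList (ds : List String) : ∀ (l : String),
    (ds.foldl (fun acc d => acc ++ (d ++ "\n")) l).toList =
      l.toList ++ ((ds.map (· ++ "\n")).map String.toList).flatten := by
  induction ds with
  | nil => intro l; simp
  | cons d t ih =>
    intro l
    rw [List.foldl_cons, ih]
    simp [String.toList_append, List.append_assoc]

lemma pvRenderA : ∀ (keg : List PvRec) (lap : String) (n : Int),
    (keg.foldl pvFmtStep (lap, n)).1.toList =
      lap.toList ++ ((pvEmit n keg).map String.toList).flatten := by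
  intro keg
  induction keg with
  | nil => intro lap n; simp [pvEmit]
  | cons r rs ih =>
    intro lap n
    have hstep : pvFmtStep (lap, n) r =
        ((r.detail.foldl (fun acc d => acc ++ (d ++ "\n"))
          ((lap ++ (PySem.Int.toStr n ++ ".  Pukul " ++ r.waktu ++ " WIB\n")) ++ (r.judul ++ "\n"))) ++ "\n",
         n + 1) := rfl
    rw [List.foldl_cons, hstep, ih]
    simp [String.toList_append, pvDetailFold_toList, pvEmit, pvBlockOf, List.append_assoc]

lemma pvJoin_nil_flatten (l : List (List Char)) : PySem.Chars.join [] l = l.flatten := by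
  induction l with
  | nil => rfl
  | cons x t ih =>
    cases t with
    | nil => simp [PySem.Chars.join_singleton]
    | cons y r => rw [PySem.Chars.join_cons_cons, ih]; simp

-- the whole program equality, stated over abstract header fragments and tail lines
lemma pvMain (ps : List String) (rawtail : List String) (lap : String)
    (hlap : lap.toList = (ps.map String.toList).flatten)
    (H : ∀ j, j < (rawtail.map PySem.Str.strip).length →
      pvIsMappingLine ((rawtail.map PySem.Str.strip).getD j "") = true →
      ∃ k, k < j ∧ pvTimeLike ((rawtail.map PySem.Str.strip).getD k "") = true ∧
        ∀ m, m < j → k < m → (rawtail.map PySem.Str.strip).getD m "" ≠ "") :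
    (match rawtail.foldl pvStepA (some ([], none)) with
     | none => ""
     | some (keg, cur) =>
       ((match cur with | some c => keg ++ [c] | none => keg).foldl pvFmtStep (lap, 1)).1 ++
         "Demikian kami laporkan   terimakasih selamat malam.") =
    PySem.Str.join "" ((pvFlushB (rawtail.foldl pvStepB (ps, 0, none))).1 ++
      ["Demikian kami laporkan   terimakasih selamat malam."]) := by
  have hsafe : pvSafeS false (rawtail.map PySem.Str.strip) :=
    pvSafeS_of_index (rawtail.map PySem.Str.strip) false (fun j hj hM => Or.inl (H j hj hM))
  obtain ⟨⟨keg, cur⟩, hA, hB⟩ := pvFold_sim rawtail [] none ps (by simpa using hsafe)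
  have hinit : pvBOf ps (([] : List PvRec), (none : Option PvRec)) = (ps, (0 : Int), none) := by
    simp [pvBOf, pvEmit]
  rw [← hinit, hA, hB, pvFlush_bOf]
  cases cur with
  | none =>
    rw [← String.toList_inj]
    simp [String.toList_append, PySem.Str.toList_join, pvJoin_nil_flatten, pvRenderA,
      List.append_assoc, pvBOf, hlap]
  | some c =>
    rw [← String.toList_inj]
    have h2 := pvRenderA (keg ++ [c]) lap 1
    simp only [List.foldl_append, List.foldl_cons, List.foldl_nil] at h2
    simp [String.toList_append, PySem.Str.toList_join, pvJoin_nil_flatten,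
      List.append_assoc, pvBOf, hlap, h2]

-- ===== VERDICT (by name: the statement is the Claim_ definition above) =====
theorem buat_laporan_spec : Claim_equal_buat_laporan := by
  intro inp hDom hPre
  unfold Spec_buat_laporan buat_laporan buat_laporan_alt
  unfold Pre_buat_laporan pvStrippedTail at hPre
  exact pvMain
    ["Selamat malam Gubernur\n",
      "mohon ijin melaporkan rengiat hari " ++
        PySem.Str.replace (PySem.Str.strip ((pvSplit (PySem.Str.strip inp) "\n").headD "")) "  " " " ++
        " sbb:\n\n"]
    ((pvSplit (PySem.Str.strip inp) "\n").drop 1)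
    ("Selamat malam Gubernur\n" ++
      ("mohon ijin melaporkan rengiat hari " ++
        PySem.Str.replace (PySem.Str.strip ((pvSplit (PySem.Str.strip inp) "\n").headD "")) "  " " " ++
        " sbb:\n\n"))
    (by simp [String.toList_append]) hPre
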